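-- pv_equiv track=rewrite | github.com/tbarlow12/Learn-It-Your-Way | server/data_tools/data_cleaning.py | is_categorical
-- ===== SOURCE A (Python) =====
-- categorical_limit = 2
--
-- def is_categorical(instances):
--     categorical = []
--     all_distinct_vals = []
--     for i in range(0,len(instances[0])):
--         distinct_vals = set([line[i] for line in instances])
--         all_distinct_vals.append(distinct_vals)
--         if len(distinct_vals) <= categorical_limit:
--             categorical.append(1)
--         else:
--             categorical.append(0)
--     text_indices = get_text_indices(instances)
--     for index in text_indices:
--         categorical[index] = 1
--     return categorical, all_distinct_vals, text_indices
--
-- def get_text_indices(lines):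
--     indices = set()
--     for line in lines:
--         for i in range(0,len(line)):
--             try:
--                 x = float(line[i])
--             except ValueError:
--                 indices.add(i)
--     return indices
-- ===== SOURCE B (Python) =====
-- def is_categorical(instances):
--     n = len(instances[0])
--     distinct = [set() for _ in range(n)]
--     text = set()
--     for row in instances:
--         _scan_row(row, distinct, text)
--     categorical = [1 if (k in text or len(distinct[k]) <= 2) else 0 for k in range(n)]
--     return categorical, distinct, text
--
-- def _scan_row(row, distinct, text):
--     i = 0
--     for cell in row:
--         distinct[i].add(cell)
--         try:
--             float(cell)
--         except ValueError:
--             text.add(i)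
--         i += 1
-- ===== Notes on version B (the rewrite author's own statement) =====
-- stated objective: alternative
-- what changed: B replaces A's column-major pass (one set-comprehension scan of all rows per column) plus a second full scan for text detection with a single row-major pass (a per-row scanning helper) that simultaneously updates per-column distinct sets and the text-index set, then derives the categorical flags in one comprehension instead of build-then-patch.
-- outside the precondition, e.g. on is_categorical([['a'], ['b', '1']]): A returns ([1], [{'a', 'b'}], {0}), B raises IndexError
import Mathlib
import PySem

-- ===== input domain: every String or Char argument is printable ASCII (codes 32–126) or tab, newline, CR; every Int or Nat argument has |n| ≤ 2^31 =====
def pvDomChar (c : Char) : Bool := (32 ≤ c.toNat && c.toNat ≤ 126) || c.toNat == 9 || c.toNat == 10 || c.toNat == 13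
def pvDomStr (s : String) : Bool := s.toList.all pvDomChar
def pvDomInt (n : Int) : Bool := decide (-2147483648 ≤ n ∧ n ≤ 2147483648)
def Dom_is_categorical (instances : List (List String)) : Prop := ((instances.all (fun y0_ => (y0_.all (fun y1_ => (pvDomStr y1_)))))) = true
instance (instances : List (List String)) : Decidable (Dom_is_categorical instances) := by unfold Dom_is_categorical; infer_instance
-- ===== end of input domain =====

-- B makes a single row-major pass by structural recursion over the rows (one scan updating the
-- per-column distinct sets and the text-index set together) instead of A's column-major pass
-- plus a second full scan; return-value equivalence only.

-- ===== PORT A =====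
-- A-side helper: Boolean success of Python's float(s) (does it NOT raise ValueError), hand-ported
-- step for step from CPython's float grammar as a recursive-descent consumer; exact on the
-- printable-ASCII domain.
-- digit run with single '_' separators already consumed its first digit; returns the unconsumed rest
def pvDigitsTail : List Char → List Char
  | '_' :: c :: rest => if c.isDigit then pvDigitsTail rest else '_' :: c :: rest
  | c :: rest => if c.isDigit then pvDigitsTail rest else c :: rest
  | [] => []

-- a digitpart: at least one digit, '_' only between digits; none = no leading digit
def pvDigits? : List Char → Option (List Char)
  | c :: rest => if c.isDigit then some (pvDigitsTail rest) else none
  | [] => none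

def pvDropSign : List Char → List Char
  | c :: rest => if c = '+' || c = '-' then rest else c :: rest
  | [] => []

-- what may follow the mantissa: end of string, or an exponent consuming everything
def pvExpOk : List Char → Bool
  | [] => true
  | c :: rest =>
    if c = 'e' || c = 'E' then
      match pvDigits? (pvDropSign rest) with
      | some [] => true
      | _ => false
    else false

-- unsigned numeric literal: digitpart ['.' [digitpart]] [exp] | '.' digitpart [exp]
def pvNumOk (cs : List Char) : Bool :=
  match cs with
  | '.' :: rest =>
    match pvDigits? rest with
    | some r => pvExpOk r
    | none => false
  | _ =>
    match pvDigits? cs with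
    | none => false
    | some r =>
      match r with
      | '.' :: r2 =>
        (match pvDigits? r2 with
         | some r3 => pvExpOk r3
         | none => pvExpOk r2)
      | _ => pvExpOk r

def pvIsWs (c : Char) : Bool :=
  c = ' ' || c = '\t' || c = '\n' || c = '\x0b' || c = '\x0c' || c = '\r'

-- True iff Python float(s) succeeds (no ValueError)
def pvFloatable (s : String) : Bool :=
  let cs := ((s.toList.dropWhile pvIsWs).reverse.dropWhile pvIsWs).reverse
  let body := pvDropSign cs
  let low := body.map Char.toLower
  low = ['i','n','f'] || low = ['i','n','f','i','n','i','t','y'] || low = ['n','a','n'] || pvNumOk body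

def get_text_indices (lines : List (List String)) : PySem.Set Int :=
  lines.foldl (fun indices line =>
    (PySem.List.pyRange 0 (line.length : Int) 1).foldl (fun indices i =>
      if pvFloatable (PySem.List.pyGetD line i "") then indices else PySem.Set.add indices i)
      indices)
    PySem.Set.empty

-- categorical_limit = 2 is inlined below
def is_categorical (instances : List (List String)) : List Int × List (List String) × List Int :=
  let pair := (PySem.List.pyRange 0 (((instances.headD []).length : Int)) 1).foldl
    (fun (acc : List Int × List (List String)) i =>
      let distinct_vals : PySem.Set String :=
        PySem.Set.ofList (instances.map (fun line => PySem.List.pyGetD line i ""))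
      (acc.1 ++ [if PySem.Set.len distinct_vals ≤ 2 then (1 : Int) else 0],
       acc.2 ++ [distinct_vals]))
    ([], [])
  let text_indices := get_text_indices instances
  let categorical := text_indices.foldl (fun cat index => PySem.List.pySetD cat index (1 : Int)) pair.1
  (categorical, pair.2, text_indices)

-- ===== PORT B =====
-- B-side helper: the same 'try: float(cell) / except ValueError' test, hand-ported as a
-- deterministic finite automaton driven once over the characters; exact on the printable-ASCII
-- domain.
inductive pvFSt
  | s0 | dD | dU | pDot | p0 | fD | fU | e0 | eS | xD | xU | bad
deriving DecidableEq, Repr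

def pvFStep : pvFSt → Char → pvFSt
  | .s0, c => if c.isDigit then .dD else if c = '.' then .p0 else .bad
  | .dD, c => if c.isDigit then .dD else if c = '_' then .dU else if c = '.' then .pDot else if c = 'e' || c = 'E' then .e0 else .bad
  | .dU, c => if c.isDigit then .dD else .bad
  | .pDot, c => if c.isDigit then .fD else if c = 'e' || c = 'E' then .e0 else .bad
  | .p0, c => if c.isDigit then .fD else .bad
  | .fD, c => if c.isDigit then .fD else if c = '_' then .fU else if c = 'e' || c = 'E' then .e0 else .bad
  | .fU, c => if c.isDigit then .fD else .bad
  | .e0, c => if c.isDigit then .xD else if c = '+' || c = '-' then .eS else .bad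
  | .eS, c => if c.isDigit then .xD else .bad
  | .xD, c => if c.isDigit then .xD else if c = '_' then .xU else .bad
  | .xU, c => if c.isDigit then .xD else .bad
  | .bad, _ => .bad

def pvFAccept : pvFSt → Bool
  | .dD => true
  | .pDot => true
  | .fD => true
  | .xD => true
  | _ => false

def pvNumOkAlt (cs : List Char) : Bool := pvFAccept (cs.foldl pvFStep .s0)

def pvSpace (c : Char) : Bool := [' ', '\t', '\n', '\x0b', '\x0c', '\r'].contains c

def pvSignless : List Char → List Char
  | '+' :: r => r
  | '-' :: r => r
  | cs => cs

def pvFloatAlt (s : String) : Bool :=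
  let b := pvSignless (((s.toList.dropWhile pvSpace).reverse.dropWhile pvSpace).reverse)
  let low := b.map Char.toLower
  low == ['n','a','n'] || low == ['i','n','f'] || low == ['i','n','f','i','n','i','t','y'] || pvNumOkAlt b

-- '_scan_row': 'distinct[i].add(cell)' (in-place mutation of the i-th set) is ported as
-- read/add/write-back; the running index i is the first argument
def pvScanRow : Int → List String → List (List String) → PySem.Set Int → List (List String) × PySem.Set Int
  | _, [], d, t => (d, t)
  | i, c :: cs, d, t =>
      pvScanRow (i + 1) cs
        (PySem.List.pySetD d i (PySem.Set.add (PySem.List.pyGetD d i []) c))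
        (if pvFloatAlt c then t else PySem.Set.add t i)

-- the 'for row in instances' loop, as structural recursion over the rows
def pvScanAll : List (List String) → List (List String) → PySem.Set Int → List (List String) × PySem.Set Int
  | [], d, t => (d, t)
  | row :: rows, d, t =>
      match pvScanRow 0 row d t with
      | (d2, t2) => pvScanAll rows d2 t2

def is_categorical_alt (instances : List (List String)) : List Int × List (List String) × List Int :=
  let n := (instances.headD []).length
  let dt := pvScanAll instances (List.replicate n PySem.Set.empty) PySem.Set.empty
  let categorical := (List.range n).map (fun k =>
      if PySem.Set.contains dt.2 (k : Int) || PySem.Set.len (PySem.List.pyGetD dt.1 (k : Int) []) ≤ 2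
      then (1 : Int) else 0)
  (categorical, dt.1, dt.2)

-- ===== PRECONDITION & SPEC =====
-- Pre_ excludes the empty list (A raises IndexError on instances[0]) and ragged inputs: there A
-- either raises IndexError or mixes row-0-based and per-row index ranges, and B raises IndexError.
def Pre_is_categorical (instances : List (List String)) : Prop :=
  instances ≠ [] ∧ ∀ line ∈ instances, line.length = (instances.headD []).length
instance (instances : List (List String)) : Decidable (Pre_is_categorical instances) := by
  unfold Pre_is_categorical; infer_instance

def pvWitness_is_categorical : List (List String) := [["a", "1"], ["b", "2.5"], ["a", "xy"]]

def Spec_is_categorical (instances : List (List String)) (out : List Int × List (List String) × List Int) : Prop := out = is_categorical_alt instances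
instance (instances : List (List String)) (out : List Int × List (List String) × List Int) : Decidable (Spec_is_categorical instances out) := by unfold Spec_is_categorical; infer_instance

-- ===== CLAIM (what is proved, stated in full; the proofs are below) =====
def Claim_equal_is_categorical : Prop := ∀ (instances : List (List String)), Dom_is_categorical instances → Pre_is_categorical instances → Spec_is_categorical instances (is_categorical instances)

-- ===== LEMMAS AND PROOFS =====

-- (1) B's DFA float recognizer agrees with A's recursive-descent one.

lemma acc_bad : ∀ cs : List Char, pvFAccept (cs.foldl pvFStep .bad) = false := by
  intro cs
  induction cs with
  | nil => rfl
  | cons c cs ih => simpa [pvFStep] using ih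

lemma acc_xD : ∀ cs : List Char, pvFAccept (cs.foldl pvFStep .xD) = decide (pvDigitsTail cs = []) := by
  intro cs
  induction cs using pvDigitsTail.induct with
  | case1 c rest hd ih => simp [pvFStep, pvDigitsTail, hd, ih]
  | case2 c rest hd => simp [pvFStep, pvDigitsTail, hd, acc_bad]
  | case3 c rest hne hd ih => simp [pvFStep, pvDigitsTail, hd, ih]
  | case4 c rest hne hd =>
    by_cases hc : c = '_'
    · subst hc
      cases rest with
      | nil => simp [pvFStep, pvDigitsTail, pvFAccept]
      | cons d ds => exact absurd (hne d ds rfl rfl) not_false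
    · simp [pvFStep, pvDigitsTail, hd, hc, acc_bad]
  | case5 => rfl

lemma pv_digit_not_sign {c : Char} (hd : c.isDigit = true) : (c = '+' || c = '-') = false := by
  rcases hc : (decide (c = '+') || decide (c = '-')) with _ | _
  · rfl
  · rcases (Bool.or_eq_true _ _).mp hc with h | h <;>
      (rw [decide_eq_true_iff] at h; subst h; exact absurd hd (by decide))

lemma acc_eS : ∀ cs : List Char, pvFAccept (cs.foldl pvFStep .eS)
    = (match pvDigits? cs with | some [] => true | _ => false) := by
  intro cs
  cases cs with
  | nil => rfl
  | cons c rest =>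
    by_cases hd : c.isDigit
    · cases htail : pvDigitsTail rest <;> simp [pvFStep, pvDigits?, hd, acc_xD, htail]
    · simp [pvFStep, pvDigits?, hd, acc_bad]

lemma acc_e0 : ∀ cs : List Char, pvFAccept (cs.foldl pvFStep .e0)
    = (match pvDigits? (pvDropSign cs) with | some [] => true | _ => false) := by
  intro cs
  cases cs with
  | nil => rfl
  | cons c rest =>
    by_cases hd : c.isDigit
    · cases htail : pvDigitsTail rest <;>
        simp [pvFStep, pvDropSign, hd, pv_digit_not_sign hd, pvDigits?, acc_xD, htail]
    · by_cases hs : (c = '+' || c = '-')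
      · simp [pvFStep, pvDropSign, hd, hs, acc_eS]
      · simp [pvFStep, pvDropSign, hd, hs, pvDigits?, acc_bad]

lemma acc_fD : ∀ cs : List Char, pvFAccept (cs.foldl pvFStep .fD) = pvExpOk (pvDigitsTail cs) := by
  intro cs
  induction cs using pvDigitsTail.induct with
  | case1 c rest hd ih => simp [pvFStep, pvDigitsTail, hd, ih]
  | case2 c rest hd => simp [pvFStep, pvDigitsTail, hd, acc_bad, pvExpOk]
  | case3 c rest hne hd ih => simp [pvFStep, pvDigitsTail, hd, ih]
  | case4 c rest hne hd =>
    by_cases hc : c = '_'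
    · subst hc
      cases rest with
      | nil => simp [pvFStep, pvDigitsTail, pvFAccept, pvExpOk]
      | cons d ds => exact absurd (hne d ds rfl rfl) not_false
    · by_cases he : (c = 'e' || c = 'E')
      · simp [pvFStep, pvDigitsTail, hd, hc, he, acc_e0, pvExpOk]
      · simp [pvFStep, pvDigitsTail, hd, hc, he, acc_bad, pvExpOk]
  | case5 => rfl

lemma acc_pDot : ∀ cs : List Char, pvFAccept (cs.foldl pvFStep .pDot)
    = (match pvDigits? cs with | some r => pvExpOk r | none => pvExpOk cs) := by
  intro cs
  cases cs with
  | nil => rfl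
  | cons c rest =>
    by_cases hd : c.isDigit
    · simp [pvFStep, pvDigits?, hd, acc_fD]
    · by_cases he : (c = 'e' || c = 'E')
      · simp [pvFStep, pvDigits?, hd, he, acc_e0, pvExpOk]
      · simp [pvFStep, pvDigits?, hd, he, acc_bad, pvExpOk]

lemma acc_p0 : ∀ cs : List Char, pvFAccept (cs.foldl pvFStep .p0)
    = (match pvDigits? cs with | some r => pvExpOk r | none => false) := by
  intro cs
  cases cs with
  | nil => rfl
  | cons c rest =>
    by_cases hd : c.isDigit
    · simp [pvFStep, pvDigits?, hd, acc_fD]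
    · simp [pvFStep, pvDigits?, hd, acc_bad]

-- the parser's continuation after the integer digitpart, as a named function
def pvAfterInt : List Char → Bool
  | [] => true
  | '.' :: r2 => (match pvDigits? r2 with | some r3 => pvExpOk r3 | none => pvExpOk r2)
  | r => pvExpOk r

lemma acc_dD : ∀ cs : List Char, pvFAccept (cs.foldl pvFStep .dD) = pvAfterInt (pvDigitsTail cs) := by
  intro cs
  induction cs using pvDigitsTail.induct with
  | case1 c rest hd ih => simp [pvFStep, pvDigitsTail, hd, ih]
  | case2 c rest hd => simp [pvFStep, pvDigitsTail, hd, acc_bad, pvAfterInt, pvExpOk]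
  | case3 c rest hne hd ih => simp [pvFStep, pvDigitsTail, hd, ih]
  | case4 c rest hne hd =>
    by_cases hc : c = '_'
    · subst hc
      cases rest with
      | nil => simp [pvFStep, pvDigitsTail, pvFAccept, pvAfterInt, pvExpOk]
      | cons d ds => exact absurd (hne d ds rfl rfl) not_false
    · by_cases hp : c = '.'
      · subst hp
        simp [pvFStep, pvDigitsTail, hd, acc_pDot, pvAfterInt]
      · by_cases he : (c = 'e' || c = 'E')
        · simp [pvFStep, pvDigitsTail, hd, hc, hp, he, acc_e0, pvAfterInt, pvExpOk]
        · simp [pvFStep, pvDigitsTail, hd, hc, hp, he, acc_bad, pvAfterInt, pvExpOk]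
  | case5 => rfl

lemma numOkAlt_eq : ∀ cs : List Char, pvNumOkAlt cs = pvNumOk cs := by
  intro cs
  cases cs with
  | nil => rfl
  | cons c rest =>
    simp only [pvNumOk]
    split
    · next r heq =>
      obtain ⟨rfl, rfl⟩ : c = '.' ∧ rest = r := by
        injection heq with h1 h2; exact ⟨h1, h2⟩
      simp [pvNumOkAlt, pvFStep, acc_p0]
    · next x hne =>
      have hp : c ≠ '.' := by
        intro h; exact hne rest (by rw [h])
      by_cases hd : c.isDigit
      · have h0 : pvDigits? (c :: rest) = some (pvDigitsTail rest) := by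
          simp [pvDigits?, hd]
        simp only [pvNumOkAlt, List.foldl_cons, pvFStep, hd, if_pos, h0, acc_dD]
        cases htail : pvDigitsTail rest with
        | nil => simp [pvAfterInt, pvExpOk]
        | cons d ds =>
          split
          · next r2 heq2 =>
            obtain ⟨rfl, rfl⟩ : d = '.' ∧ ds = r2 := by
              injection heq2 with h1 h2; exact ⟨h1, h2⟩
            cases hds : pvDigits? ds <;> simp [pvAfterInt, hds]
          · next x2 hne2 =>
            have hdd : d ≠ '.' := by
              intro h; exact hne2 ds (by rw [h])
            rw [pvAfterInt.eq_def]
            split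
            · next heq3 => exact absurd heq3 (by simp)
            · next r2 heq3 =>
              injection heq3 with h1 _
              exact absurd h1 hdd
            · rfl
      · simp [pvNumOkAlt, pvFStep, hd, hp, pvDigits?, acc_bad]

lemma pvSpace_eq : pvSpace = pvIsWs := by
  funext c
  apply Bool.eq_iff_iff.mpr
  simp [pvSpace, pvIsWs]
  tauto

lemma pvSignless_eq (cs : List Char) : pvSignless cs = pvDropSign cs := by
  cases cs with
  | nil => rfl
  | cons c r =>
    rw [pvSignless.eq_def]
    split
    · next r2 heq =>
      injection heq with h1 h2
      subst h1; subst h2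
      simp [pvDropSign]
    · next r2 heq =>
      injection heq with h1 h2
      subst h1; subst h2
      simp [pvDropSign]
    · next h1 h2 =>
      have hp : c ≠ '+' := by intro h; exact h1 r (by rw [h])
      have hm : c ≠ '-' := by intro h; exact h2 r (by rw [h])
      simp [pvDropSign, hp, hm]

lemma floatAlt_eq (s : String) : pvFloatAlt s = pvFloatable s := by
  simp only [pvFloatAlt, pvFloatable, pvSpace_eq, pvSignless_eq, numOkAlt_eq]
  apply Bool.eq_iff_iff.mpr
  simp
  tauto

-- (2) B's recursive scan, re-expressed as folds so the two ports can be compared.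

def pvUpdD (d : List (List String)) (ic : Int × String) : List (List String) :=
  PySem.List.pySetD d ic.1 (PySem.Set.add (PySem.List.pyGetD d ic.1 []) ic.2)

def pvUpdT (t : PySem.Set Int) (ic : Int × String) : PySem.Set Int :=
  if pvFloatable ic.2 then t else PySem.Set.add t ic.1

def pvRowD (d : List (List String)) (line : List String) : List (List String) :=
  (PySem.List.enumerate line 0).foldl pvUpdD d

def pvRowT (t : PySem.Set Int) (line : List String) : PySem.Set Int :=
  (PySem.List.enumerate line 0).foldl pvUpdT t

lemma scanRow_eq : ∀ (row : List String) (i : Int) (d : List (List String)) (t : PySem.Set Int),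
    pvScanRow i row d t
      = ((PySem.List.enumerate row i).foldl pvUpdD d, (PySem.List.enumerate row i).foldl pvUpdT t) := by
  intro row
  induction row with
  | nil => intro i d t; rfl
  | cons c cs ih =>
    intro i d t
    rw [pvScanRow, PySem.List.enumerate_cons, List.foldl_cons, List.foldl_cons, ih]
    simp [pvUpdD, pvUpdT, floatAlt_eq]

lemma scanAll_eq : ∀ (rows : List (List String)) (d : List (List String)) (t : PySem.Set Int),
    pvScanAll rows d t = (rows.foldl pvRowD d, rows.foldl pvRowT t) := by
  intro rows
  induction rows with
  | nil => intro d t; rfl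
  | cons row rows ih =>
    intro d t
    rw [pvScanAll, scanRow_eq, List.foldl_cons, List.foldl_cons]
    exact ih _ _

lemma range_map {β : Type} (n : Nat) (g : Int → β) :
    (List.range n).map (fun k => g (k : Int)) = (PySem.List.pyRange 0 (n : Int) 1).map g := by
  rw [PySem.List.pyRange_zero_natCast]
  simp [← List.map_eq_flatMap, List.map_map]

-- B, re-expressed with the two loops split and both maps over the Python range
lemma alt_split (instances : List (List String)) :
    is_categorical_alt instances =
      (let n := (instances.headD []).length
       let dist := instances.foldl pvRowD (List.replicate n PySem.Set.empty)
       let text := instances.foldl pvRowT PySem.Set.empty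
       ((PySem.List.pyRange 0 (n : Int) 1).map (fun i =>
          if PySem.Set.contains text i || PySem.Set.len (PySem.List.pyGetD dist i []) ≤ 2 then (1 : Int) else 0),
        dist, text)) := by
  simp only [is_categorical_alt, scanAll_eq, range_map]

-- A, with its append-loop turned into maps and the text fold renamed
lemma a_split (instances : List (List String)) :
    is_categorical instances =
      (let n := (instances.headD []).length
       let cols := (PySem.List.pyRange 0 (n : Int) 1).map (fun i =>
          PySem.Set.ofList (instances.map (fun line => PySem.List.pyGetD line i "")))
       let cat0 := (PySem.List.pyRange 0 (n : Int) 1).map (fun i =>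
          if PySem.Set.len (PySem.Set.ofList (instances.map (fun line => PySem.List.pyGetD line i ""))) ≤ 2
          then (1 : Int) else 0)
       let text := get_text_indices instances
       (text.foldl (fun cat index => PySem.List.pySetD cat index (1 : Int)) cat0, cols, text)) := by
  simp only [is_categorical]
  simp only [PySem.List.foldl_prod_mk
    (f := fun (acc : List Int) (i : Int) =>
      acc ++ [if PySem.Set.len (PySem.Set.ofList (instances.map (fun line => PySem.List.pyGetD line i ""))) ≤ 2 then (1 : Int) else 0])
    (g := fun (acc : List (List String)) (i : Int) =>
      acc ++ [PySem.Set.ofList (instances.map (fun line => PySem.List.pyGetD line i ""))]),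
    PySem.List.foldl_append_singleton_eq_map, List.nil_append]

-- B's text loop is A's get_text_indices (index loop over each row = enumerate loop)
lemma text_eq (lines : List (List String)) :
    lines.foldl pvRowT PySem.Set.empty = get_text_indices lines := by
  unfold get_text_indices
  apply PySem.List.foldl_congr_mem
  intro t line _
  unfold pvRowT
  rw [PySem.List.enumerate_eq_map_pyRange (d := ""), List.foldl_map]
  rfl

-- one row of B's distinct update is a zipWith over the current column sets
lemma rowD_aux : ∀ (line : List String) (pre d : List (List String)),
    line.length = d.length →
    (PySem.List.enumerate line (pre.length : Int)).foldl pvUpdD (pre ++ d)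
      = pre ++ List.zipWith (fun s c => PySem.Set.add s c) d line := by
  intro line
  induction line with
  | nil =>
    intro pre d h
    cases d with
    | nil => simp [PySem.List.enumerate]
    | cons s ds => simp at h
  | cons c cs ih =>
    intro pre d h
    cases d with
    | nil => simp at h
    | cons s ds =>
      rw [PySem.List.enumerate_cons, List.foldl_cons]
      have hget : PySem.List.pyGetD (pre ++ s :: ds) ((pre.length : Nat) : Int) [] = s := by
        rw [PySem.List.pyGetD_natCast]
        simp [List.getD]
      have hupd : pvUpdD (pre ++ s :: ds) (((pre.length : Nat) : Int), c)
          = (pre ++ [PySem.Set.add s c]) ++ ds := by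
        unfold pvUpdD
        rw [hget, PySem.List.pySetD_natCast, List.set_append]
        simp
      rw [hupd]
      have hlen : ((pre.length : Int) + 1) = (((pre ++ [PySem.Set.add s c]).length : Nat) : Int) := by
        simp
      rw [hlen, ih (pre ++ [PySem.Set.add s c]) ds (by simpa using h)]
      simp [List.zipWith]

lemma rowD_zip (d : List (List String)) (line : List String) (h : line.length = d.length) :
    pvRowD d line = List.zipWith (fun s c => PySem.Set.add s c) d line := by
  have := rowD_aux line [] d h
  simpa [pvRowD] using this

lemma foldRows_length : ∀ (rows : List (List String)) (d : List (List String)),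
    (∀ r ∈ rows, r.length = d.length) →
    (rows.foldl pvRowD d).length = d.length := by
  intro rows
  induction rows with
  | nil => intro d _; rfl
  | cons r rows ih =>
    intro d h
    rw [List.foldl_cons, rowD_zip d r (h r (by simp))]
    have hz : (List.zipWith (fun s c => PySem.Set.add s c) d r).length = d.length := by
      simp [List.length_zipWith, h r (by simp)]
    rw [ih _ (by intro r' hr'; rw [hz]; exact h r' (by simp [hr']))]
    exact hz

lemma foldRows_getD : ∀ (rows : List (List String)) (d : List (List String)) (k : Nat),
    k < d.length → (∀ r ∈ rows, r.length = d.length) →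
    (rows.foldl pvRowD d).getD k []
      = (rows.map (fun r => r.getD k "")).foldl (fun s c => PySem.Set.add s c) (d.getD k []) := by
  intro rows
  induction rows with
  | nil => intro d k hk _; rfl
  | cons r rows ih =>
    intro d k hk h
    rw [List.foldl_cons, rowD_zip d r (h r (by simp)), List.map_cons, List.foldl_cons]
    have hr : r.length = d.length := h r (by simp)
    have hz : (List.zipWith (fun s c => PySem.Set.add s c) d r).length = d.length := by
      simp [List.length_zipWith, hr]
    rw [ih _ k (by omega) (by intro r' hr'; rw [hz]; exact h r' (by simp [hr']))]
    have hzg : (List.zipWith (fun s c => PySem.Set.add s c) d r).getD k []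
        = PySem.Set.add (d.getD k []) (r.getD k "") := by
      rw [List.getD_eq_getElem _ _ (by omega), List.getElem_zipWith,
          List.getD_eq_getElem _ _ (by omega), List.getD_eq_getElem _ _ (by omega)]
    rw [hzg]

-- B's distinct-set list equals A's per-column distinct sets
lemma dist_eq (instances : List (List String)) (n : Nat)
    (h : ∀ line ∈ instances, line.length = n) :
    instances.foldl pvRowD (List.replicate n PySem.Set.empty)
      = (PySem.List.pyRange 0 (n : Int) 1).map (fun i =>
          PySem.Set.ofList (instances.map (fun line => PySem.List.pyGetD line i ""))) := by
  have hrep : (List.replicate n (PySem.Set.empty (α := String))).length = n := by simp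
  have hlen : (instances.foldl pvRowD (List.replicate n PySem.Set.empty)).length = n := by
    rw [foldRows_length instances _ (by intro r hr; rw [hrep]; exact h r hr)]; exact hrep
  apply List.ext_getElem
  · rw [hlen]; simp [PySem.List.length_pyRange_one]
  · intro k h1 h2
    rw [List.getElem_map, PySem.List.getElem_pyRange_one]
    have hk : k < n := by rwa [hlen] at h1
    rw [← List.getD_eq_getElem _ ([]) h1,
        foldRows_getD instances _ k (by omega) (by intro r hr; rw [hrep]; exact h r hr)]
    have hrepget : (List.replicate n (PySem.Set.empty (α := String))).getD k [] = PySem.Set.empty := by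
      rw [List.getD_eq_getElem _ _ (by omega)]; simp
    rw [hrepget, PySem.Set.ofList_eq_foldl]
    have : (fun line => PySem.List.pyGetD line (0 + (k : Int)) "") = fun (line : List String) => line.getD k "" := by
      funext line
      rw [zero_add, PySem.List.pyGetD_natCast]
    rw [this]
    rfl

-- every index in an if/add fold comes from the accumulator or the iterated list
lemma textfold_mem : ∀ (l : List Int) (p : Int → Bool) (acc : PySem.Set Int) (j : Int),
    j ∈ l.foldl (fun s i => if p i then s else PySem.Set.add s i) acc → j ∈ acc ∨ j ∈ l := by
  intro l p
  induction l with
  | nil => intro acc j hj; exact Or.inl hj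
  | cons i l ih =>
    intro acc j hj
    rw [List.foldl_cons] at hj
    rcases ih _ j hj with hm | hm
    · by_cases hp : p i
      · rw [if_pos hp] at hm; exact Or.inl hm
      · rw [if_neg hp] at hm
        rcases (PySem.Set.mem_add _ _ _).mp hm with hm' | hm'
        · exact Or.inl hm'
        · exact Or.inr (by simp [hm'])
    · exact Or.inr (by simp [hm])

lemma text_bound_aux : ∀ (lines : List (List String)) (n : Nat) (acc : PySem.Set Int),
    (∀ line ∈ lines, line.length = n) → (∀ j ∈ acc, 0 ≤ j ∧ j < (n : Int)) →
    ∀ j ∈ lines.foldl (fun indices line =>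
        (PySem.List.pyRange 0 (line.length : Int) 1).foldl (fun indices i =>
          if pvFloatable (PySem.List.pyGetD line i "") then indices else PySem.Set.add indices i)
          indices) acc,
      0 ≤ j ∧ j < (n : Int) := by
  intro lines
  induction lines with
  | nil => intro n acc _ hacc j hj; exact hacc j hj
  | cons line lines ih =>
    intro n acc h hacc j hj
    rw [List.foldl_cons] at hj
    refine ih n _ (by intro l hl; exact h l (by simp [hl])) ?_ j hj
    intro j' hj'
    rcases textfold_mem _ _ _ j' hj' with hm | hm
    · exact hacc j' hm
    · have := (PySem.List.mem_pyRange_one).mp hm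
      have hlen : line.length = n := h line (by simp)
      omega

lemma text_bound (lines : List (List String)) (n : Nat)
    (h : ∀ line ∈ lines, line.length = n) :
    ∀ j ∈ get_text_indices lines, 0 ≤ j ∧ j < (n : Int) := by
  unfold get_text_indices
  exact text_bound_aux lines n PySem.Set.empty h (by intro j hj; simp [PySem.Set.empty] at hj)

lemma setfold_length : ∀ (tl : List Int) (cat : List Int),
    (tl.foldl (fun c j => PySem.List.pySetD c j 1) cat).length = cat.length := by
  intro tl
  induction tl with
  | nil => intro cat; rfl
  | cons j tl ih =>
    intro cat
    rw [List.foldl_cons, ih, PySem.List.length_pySetD]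

lemma setfold_getD : ∀ (tl : List Int) (cat : List Int) (k : Nat),
    (∀ j ∈ tl, 0 ≤ j ∧ j < (cat.length : Int)) → k < cat.length →
    (tl.foldl (fun c j => PySem.List.pySetD c j 1) cat).getD k 0
      = if (k : Int) ∈ tl then 1 else cat.getD k 0 := by
  intro tl
  induction tl with
  | nil => intro cat k _ _; simp
  | cons j tl ih =>
    intro cat k hb hk
    rw [List.foldl_cons]
    have hj := hb j (by simp)
    have hset : PySem.List.pySetD cat j 1 = cat.set j.toNat 1 := by
      conv_lhs => rw [show j = ((j.toNat : Nat) : Int) from by omega]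
      rw [PySem.List.pySetD_natCast]
    have hlen : (cat.set j.toNat 1).length = cat.length := by simp
    rw [hset, ih _ k (by intro j' hj'; rw [hlen]; exact hb j' (by simp [hj'])) (by omega)]
    by_cases hmem : (k : Int) ∈ tl
    · simp [hmem]
    · rw [if_neg hmem]
      by_cases hkj : (k : Int) = j
      · rw [if_pos (by simp [hkj])]
        have hjk : j.toNat = k := by omega
        subst hjk
        rw [List.getD_eq_getElem _ _ (by omega), List.getElem_set]
        simp
      · rw [if_neg (by simp [hkj, hmem]), List.getD_eq_getElem _ _ (by omega),
            List.getElem_set, List.getD_eq_getElem _ _ hk]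
        have hne : j.toNat ≠ k := by omega
        simp [hne]

-- ===== VERDICT (by name: the statement is the Claim_ definition above) =====
theorem is_categorical_spec : Claim_equal_is_categorical := by
  intro instances _ hpre
  obtain ⟨hne, hlen⟩ := hpre
  unfold Spec_is_categorical
  simp only [a_split, alt_split]
  rw [text_eq, dist_eq instances _ hlen]
  refine Prod.ext ?_ rfl
  dsimp only
  have hb := text_bound instances _ hlen
  apply List.ext_getElem
  · rw [setfold_length]
    simp [PySem.List.length_pyRange_one]
  · intro k h1 h2
    have h1' := h1
    rw [setfold_length] at h1'
    have hk : k < (instances.headD []).length := by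
      simpa [PySem.List.length_pyRange_one] using h1'
    rw [← List.getD_eq_getElem _ 0 h1,
        setfold_getD _ _ k (by simpa [PySem.List.length_pyRange_one] using hb) h1',
        List.getElem_map, PySem.List.getElem_pyRange_one, zero_add,
        PySem.List.pyGetD_map_pyRange _ _ k _ hk]
    by_cases hmem : (k : Int) ∈ get_text_indices instances
    · rw [if_pos hmem]
      have : PySem.Set.contains (get_text_indices instances) (k : Int) = true := by
        simpa [PySem.Set.contains] using hmem
      rw [this]
      simp
    · rw [if_neg hmem, List.getD_eq_getElem _ _ h1', List.getElem_map,
          PySem.List.getElem_pyRange_one, zero_add]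
      have : PySem.Set.contains (get_text_indices instances) (k : Int) = false := by
        simpa [PySem.Set.contains] using hmem
      rw [this]
      simp
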